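-- pv_equiv track=rewrite | github.com/MahyarMoshiri/sv-composer | sv_p12/mapper.py | _color_for_metaphors
-- ===== SOURCE A (Python) =====
-- from typing import Dict, List, Sequence, Tuple
--
-- def _color_for_metaphors(metaphors: Sequence[str]) -> str:
--     lowered = [m.lower() for m in metaphors]
--     if any("light_dark" in m for m in lowered):
--         return "muted cools with warm edge glow"
--     if any("journey" in m for m in lowered):
--         return "grounded earth tones with gradual gradient"
--     if any("sleep_is_threshold" in m for m in lowered):
--         return "hushed neutrals with gentle haze"
--     return "balanced neutral palette"
-- ===== SOURCE B (Python) =====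
-- _PAIRS = [
--     ("light_dark", "muted cools with warm edge glow"),
--     ("journey", "grounded earth tones with gradual gradient"),
--     ("sleep_is_threshold", "hushed neutrals with gentle haze"),
-- ]
--
-- def _color_for_metaphors(metaphors):
--     # One pass over the metaphors, tracking the best (smallest) keyword index seen.
--     best = len(_PAIRS)
--     for m in metaphors:
--         low = m.lower()
--         best = next((i for i, (kw, _) in enumerate(_PAIRS) if i < best and kw in low), best)
--     if best < len(_PAIRS):
--         return _PAIRS[best][1]
--     return "balanced neutral palette"
-- ===== Notes on version B (the rewrite author's own statement) =====
-- stated objective: alternative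
-- what changed: Replaces A's three separate any-scans over the lowered list with a single pass that tracks the minimum matching keyword index in an ordered (keyword, palette) table, then indexes the table once.
import Mathlib
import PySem

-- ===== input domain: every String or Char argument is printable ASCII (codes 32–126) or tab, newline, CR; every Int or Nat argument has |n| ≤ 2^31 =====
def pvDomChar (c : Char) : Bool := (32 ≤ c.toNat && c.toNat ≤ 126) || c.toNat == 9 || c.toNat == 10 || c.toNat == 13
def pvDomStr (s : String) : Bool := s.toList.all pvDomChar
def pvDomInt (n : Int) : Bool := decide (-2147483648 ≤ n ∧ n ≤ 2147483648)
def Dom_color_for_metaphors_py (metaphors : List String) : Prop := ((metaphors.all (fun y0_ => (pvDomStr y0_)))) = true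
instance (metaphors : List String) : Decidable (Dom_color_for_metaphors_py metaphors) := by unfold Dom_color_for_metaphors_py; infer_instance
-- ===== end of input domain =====

-- B replaces A's three sequential any-scans with one pass tracking the minimum matching keyword index in an ordered table (objective: alternative decomposition, same cost).

-- ===== PORT A =====
def color_for_metaphors_py (metaphors : List String) : String :=
  let lowered := metaphors.map (fun m => PySem.Str.lower m)
  if lowered.any (fun m => PySem.Str.isIn "light_dark" m) then
    "muted cools with warm edge glow"
  else if lowered.any (fun m => PySem.Str.isIn "journey" m) then
    "grounded earth tones with gradual gradient"
  else if lowered.any (fun m => PySem.Str.isIn "sleep_is_threshold" m) then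
    "hushed neutrals with gentle haze"
  else
    "balanced neutral palette"

-- ===== PORT B =====
-- the ordered (keyword, palette) table _PAIRS of Source B
def pvPairs : List (String × String) :=
  [("light_dark", "muted cools with warm edge glow"),
   ("journey", "grounded earth tones with gradual gradient"),
   ("sleep_is_threshold", "hushed neutrals with gentle haze")]

-- one loop step of Source B: next((i for i,(kw,_) in enumerate(_PAIRS) if i < best and kw in low), best)
def pvStep (best : Nat) (m : String) : Nat :=
  let low := PySem.Str.lower m
  match (PySem.List.enumerate pvPairs).find? (fun p => decide (p.1 < (best : Int)) && PySem.Str.isIn p.2.1 low) with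
  | some (i, _) => i.toNat
  | none => best

def color_for_metaphors_py_alt (metaphors : List String) : String :=
  let best := metaphors.foldl pvStep pvPairs.length
  if h : best < pvPairs.length then (pvPairs[best]).2
  else "balanced neutral palette"

-- ===== PRECONDITION & SPEC =====
def Spec_color_for_metaphors_py (metaphors : List String) (out : String) : Prop := out = color_for_metaphors_py_alt metaphors
instance (metaphors : List String) (out : String) : Decidable (Spec_color_for_metaphors_py metaphors out) := by unfold Spec_color_for_metaphors_py; infer_instance

-- ===== CLAIM (what is proved, stated in full; the proofs are below) =====
def Claim_equal_color_for_metaphors_py : Prop := ∀ (metaphors : List String), Dom_color_for_metaphors_py metaphors → Spec_color_for_metaphors_py metaphors (color_for_metaphors_py metaphors)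

-- ===== LEMMAS AND PROOFS =====

-- smallest keyword index matching a single metaphor (3 = none)
def pvIdx (m : String) : Nat :=
  let low := PySem.Str.lower m
  if PySem.Str.isIn "light_dark" low then 0
  else if PySem.Str.isIn "journey" low then 1
  else if PySem.Str.isIn "sleep_is_threshold" low then 2
  else 3

-- smallest keyword index matching any metaphor in the list
def pvMin (metaphors : List String) : Nat :=
  match metaphors with
  | [] => 3
  | m :: t => min (pvIdx m) (pvMin t)

theorem pvStep_eq_min (best : Nat) (hb : best ≤ 3) (m : String) :
    pvStep best m = min best (pvIdx m) := by
  unfold pvStep pvIdx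
  simp only [pvPairs, PySem.List.enumerate, List.find?]
  cases h0 : PySem.Str.isIn "light_dark" (PySem.Str.lower m) <;>
  cases h1 : PySem.Str.isIn "journey" (PySem.Str.lower m) <;>
  cases h2 : PySem.Str.isIn "sleep_is_threshold" (PySem.Str.lower m) <;>
    simp only [PySem.Str.isIn, PySem.Str.lower] at h0 h1 h2 <;>
    interval_cases best <;> simp [h0, h1, h2]

theorem foldl_pvStep (metaphors : List String) : ∀ b, b ≤ 3 →
    metaphors.foldl pvStep b = min b (pvMin metaphors) := by
  induction metaphors with
  | nil => intro b hb; simp [pvMin]; omega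
  | cons m t ih =>
    intro b hb
    have h1 := pvStep_eq_min b hb m
    have h2 := ih (pvStep b m) (by omega)
    simp only [List.foldl_cons, pvMin] at *
    omega

theorem pvMinIf (a0 a1 a2 b0 b1 b2 : Bool) :
    min (if a0 = true then 0 else if a1 = true then 1 else if a2 = true then 2 else 3)
        (if b0 = true then 0 else if b1 = true then 1 else if b2 = true then 2 else 3) =
      (if (a0 || b0) = true then (0 : Nat) else if (a1 || b1) = true then 1
       else if (a2 || b2) = true then 2 else 3) := by
  cases a0 <;> cases a1 <;> cases a2 <;> cases b0 <;> cases b1 <;> cases b2 <;> decide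

theorem pvMin_char (ms : List String) : pvMin ms =
    (if ms.any (fun m => PySem.Str.isIn "light_dark" (PySem.Str.lower m)) then 0
     else if ms.any (fun m => PySem.Str.isIn "journey" (PySem.Str.lower m)) then 1
     else if ms.any (fun m => PySem.Str.isIn "sleep_is_threshold" (PySem.Str.lower m)) then 2
     else 3) := by
  induction ms with
  | nil => simp only [pvMin, List.any_nil, Bool.false_eq_true, if_false]
  | cons m t ih =>
    simp only [pvMin, pvIdx, List.any_cons, ih]
    exact pvMinIf _ _ _ _ _ _

-- ===== VERDICT (by name: the statement is the Claim_ definition above) =====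
theorem color_for_metaphors_py_spec : Claim_equal_color_for_metaphors_py := by
  intro metaphors _
  unfold Spec_color_for_metaphors_py color_for_metaphors_py color_for_metaphors_py_alt
  have halt : metaphors.foldl pvStep pvPairs.length = pvMin metaphors := by
    have h3 : pvPairs.length = 3 := rfl
    have hle : pvMin metaphors ≤ 3 := by
      cases metaphors with
      | nil => simp [pvMin]
      | cons m t =>
        have : pvIdx m ≤ 3 := by unfold pvIdx; dsimp only; split_ifs <;> omega
        simp only [pvMin]; omega
    rw [h3, foldl_pvStep metaphors 3 (le_refl 3)]; omega
  rw [halt, pvMin_char]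
  simp only [List.any_map, Function.comp_def]
  cases ha : metaphors.any (fun m => PySem.Str.isIn "light_dark" (PySem.Str.lower m)) <;>
  cases hb : metaphors.any (fun m => PySem.Str.isIn "journey" (PySem.Str.lower m)) <;>
  cases hc : metaphors.any (fun m => PySem.Str.isIn "sleep_is_threshold" (PySem.Str.lower m)) <;>
    simp only [Bool.false_eq_true, Bool.true_eq_false, if_true, if_false, reduceIte] <;> rfl
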